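-- pv_equiv track=rewrite | github.com/ACFHarbinger/WSmartPlus-Route | logic/src/policies/other/post_processing/common/helpers.py | split_tour
-- ===== SOURCE A (Python) =====
-- from typing import Any, Dict, Iterable, List, Optional, Sequence
--
-- def split_tour(tour: Sequence[int]) -> List[List[int]]:
--     """Split a multi-trip tour separated by depot 0s into per-trip lists."""
--     routes: List[List[int]] = []
--     current: List[int] = []
--     for node in tour:
--         if node == 0:
--             if current:
--                 routes.append(current)
--                 current = []
--         else:
--             current.append(node)
--     if current:
--         routes.append(current)
--     return routes
-- ===== SOURCE B (Python) =====
-- from typing import List, Sequence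
--
-- def split_tour(tour: Sequence[int]) -> List[List[int]]:
--     """Split a multi-trip tour separated by depot 0s into per-trip lists."""
--     tour = list(tour)
--     cuts = [i for i, node in enumerate(tour) if node == 0]
--     cuts = [-1] + cuts + [len(tour)]
--     return [tour[a + 1:b] for a, b in zip(cuts, cuts[1:]) if b - a > 1]
-- ===== Notes on version B (the rewrite author's own statement) =====
-- stated objective: alternative
-- what changed: Replaces the accumulator-and-flush single pass by staged passes: first collect the indices of the depot zeros, extend them with sentinel cuts -1 and len(tour), then slice the tour between each pair of consecutive cuts, keeping only non-empty slices.
import Mathlib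
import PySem

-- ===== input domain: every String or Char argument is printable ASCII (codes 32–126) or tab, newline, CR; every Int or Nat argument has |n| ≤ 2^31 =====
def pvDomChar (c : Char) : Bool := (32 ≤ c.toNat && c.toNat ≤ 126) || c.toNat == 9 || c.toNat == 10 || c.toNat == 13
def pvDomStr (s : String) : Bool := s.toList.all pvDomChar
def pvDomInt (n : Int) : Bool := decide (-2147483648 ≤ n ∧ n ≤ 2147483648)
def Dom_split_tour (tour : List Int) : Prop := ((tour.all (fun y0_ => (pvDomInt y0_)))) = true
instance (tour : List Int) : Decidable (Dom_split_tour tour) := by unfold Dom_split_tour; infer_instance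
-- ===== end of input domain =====

-- B replaces the accumulator-and-flush loop by staged passes: collect zero indices, add sentinel cuts, slice between consecutive cuts.

-- ===== PORT A =====
-- A's loop state: (routes, current); flush current into routes on a depot 0 if nonempty.
def splitTourStep (s : List (List Int) × List Int) (node : Int) : List (List Int) × List Int :=
  if node = 0 then
    (if s.2 ≠ [] then (s.1 ++ [s.2], []) else s)
  else
    (s.1, s.2 ++ [node])

def split_tour (tour : List Int) : List (List Int) :=
  let s := tour.foldl splitTourStep ([], [])
  if s.2 ≠ [] then s.1 ++ [s.2] else s.1

-- ===== PORT B =====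
-- cuts = [-1] + [i for i, node in enumerate(tour) if node == 0] + [len(tour)];
-- then [tour[a+1:b] for a, b in zip(cuts, cuts[1:]) if b - a > 1]
def split_tour_alt (tour : List Int) : List (List Int) :=
  let zs : List Int := (PySem.List.enumerate tour 0).filterMap
    (fun p => if p.2 = 0 then some p.1 else none)
  let cuts : List Int := -1 :: zs ++ [(tour.length : Int)]
  (cuts.zip cuts.tail).filterMap
    (fun p => if p.2 - p.1 > 1 then some (PySem.List.slice tour (some (p.1 + 1)) (some p.2)) else none)

-- ===== PRECONDITION & SPEC =====
def Spec_split_tour (tour : List Int) (out : List (List Int)) : Prop := out = split_tour_alt tour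
instance (tour : List Int) (out : List (List Int)) : Decidable (Spec_split_tour tour out) := by unfold Spec_split_tour; infer_instance

-- ===== CLAIM (what is proved, stated in full; the proofs are below) =====
def Claim_equal_split_tour : Prop := ∀ (tour : List Int), Dom_split_tour tour → Spec_split_tour tour (split_tour tour)

-- ===== LEMMAS AND PROOFS =====

-- common reference form: recursion peeling maximal non-zero runs
def splitRec : List Int → List (List Int)
  | [] => []
  | x :: rest =>
    if x = 0 then splitRec rest
    else (x :: rest.takeWhile (· ≠ 0)) :: splitRec (rest.dropWhile (· ≠ 0))
termination_by l => l.length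
decreasing_by
  · simp
  · simp [List.length_dropWhile_le]

-- A = splitRec ------------------------------------------------------------

theorem splitTour_foldl_routes (l : List Int) (routes : List (List Int)) (cur : List Int) :
    l.foldl splitTourStep (routes, cur) =
      (routes ++ (l.foldl splitTourStep ([], cur)).1, (l.foldl splitTourStep ([], cur)).2) := by
  induction l generalizing routes cur with
  | nil => simp
  | cons x l ih =>
    simp only [List.foldl_cons, splitTourStep]
    by_cases hx : x = 0
    · by_cases hc : cur = []
      · simp [hx, hc, ih routes []]
      · simp only [hx, hc, ite_true, ne_eq, not_false_eq_true]
        rw [ih (routes ++ [cur]) [], show ([] : List (List Int)) ++ [cur] = [cur] from rfl,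
          ih [cur] []]
        simp
    · simp only [hx, ite_false]
      exact ih routes (cur ++ [x])

theorem splitTour_run (l : List Int) (cur : List Int) :
    (if (l.foldl splitTourStep ([], cur)).2 ≠ [] then
        (l.foldl splitTourStep ([], cur)).1 ++ [(l.foldl splitTourStep ([], cur)).2]
      else (l.foldl splitTourStep ([], cur)).1) =
      (if cur = [] then splitRec l
       else (cur ++ l.takeWhile (· ≠ 0)) :: splitRec (l.dropWhile (· ≠ 0))) := by
  induction l generalizing cur with
  | nil =>
    by_cases hc : cur = [] <;> simp [hc, splitRec]
  | cons x l ih =>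
    by_cases hx : x = 0
    · by_cases hc : cur = []
      · rw [List.foldl_cons,
          show splitTourStep ([], cur) x = ([], []) from by simp [splitTourStep, hx, hc]]
        simpa [hc, hx, splitRec] using ih []
      · rw [List.foldl_cons,
          show splitTourStep ([], cur) x = ([cur], []) from by simp [splitTourStep, hx, hc],
          splitTour_foldl_routes l [cur] []]
        have h2 := ih ([] : List Int)
        simp only [ite_true] at h2
        by_cases hF : (l.foldl splitTourStep ([], [])).2 = [] <;>
          simp_all [splitRec]
    · rw [List.foldl_cons,
        show splitTourStep ([], cur) x = ([], cur ++ [x]) from by simp [splitTourStep, hx]]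
      have h2 := ih (cur ++ [x])
      by_cases hc : cur = [] <;> simp_all [splitRec]

theorem split_tour_eq_splitRec (tour : List Int) : split_tour tour = splitRec tour := by
  unfold split_tour
  simpa using splitTour_run tour []

-- B = splitRec ------------------------------------------------------------

-- zero-index list of B
def zsOf (tour : List Int) : List Int :=
  (PySem.List.enumerate tour 0).filterMap (fun p => if p.2 = 0 then some p.1 else none)

-- the chunk recursion B's zip/filterMap unfolds to
def chunks (tour : List Int) (a : Int) : List Int → List (List Int)
  | [] =>
      if (tour.length : Int) - a > 1 then
        [PySem.List.slice tour (some (a + 1)) (some (tour.length : Int))]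
      else []
  | b :: bs =>
      (if b - a > 1 then [PySem.List.slice tour (some (a + 1)) (some b)] else []) ++
        chunks tour b bs

theorem B_eq_chunks_aux (tour : List Int) (l : List Int) (a : Int) :
    (((a :: l ++ [(tour.length : Int)]).zip (l ++ [(tour.length : Int)])).filterMap
      (fun p => if p.2 - p.1 > 1 then some (PySem.List.slice tour (some (p.1 + 1)) (some p.2)) else none)) =
    chunks tour a l := by
  induction l generalizing a with
  | nil =>
    simp only [List.nil_append, chunks]
    split_ifs with h <;> simp_all [List.filterMap, gt_iff_lt]
  | cons b bs ih =>
    simp only [List.cons_append, List.zip_cons_cons, List.filterMap_cons, chunks]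
    rw [← ih b]
    split_ifs <;> simp

theorem B_eq_chunks (tour : List Int) :
    split_tour_alt tour = chunks tour (-1) (zsOf tour) := by
  unfold split_tour_alt zsOf
  exact B_eq_chunks_aux tour _ (-1)

-- the enumerate/filterMap zero-index pass, with arbitrary start
def zsF (l : List Int) (s : Int) : List Int :=
  (PySem.List.enumerate l s).filterMap (fun p => if p.2 = 0 then some p.1 else none)

theorem zsF_cons (x : Int) (l : List Int) (s : Int) :
    zsF (x :: l) s = (if x = 0 then [s] else []) ++ zsF l (s + 1) := by
  simp only [zsF, PySem.List.enumerate_cons, List.filterMap_cons]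
  split_ifs <;> simp

theorem zsF_shift (l : List Int) (s : Int) :
    zsF l s = (zsF l 0).map (· + s) := by
  induction l generalizing s with
  | nil => simp [zsF]
  | cons x l ih =>
    rw [zsF_cons x l s, zsF_cons x l 0, ih (s + 1), ih (0 + 1), List.map_append, List.map_map]
    congr 1
    · split_ifs <;> simp
    · refine List.map_congr_left (fun b _ => ?_)
      simp [Function.comp]; ring

theorem zsOf_eq (l : List Int) : zsOf l = zsF l 0 := rfl

theorem zsOf_cons (x : Int) (l : List Int) :
    zsOf (x :: l) = (if x = 0 then [(0 : Int)] else []) ++ (zsOf l).map (· + 1) := by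
  rw [zsOf_eq, zsF_cons, zsF_shift l (0 + 1), ← zsOf_eq]
  norm_num

theorem zsOf_nonneg (l : List Int) : ∀ b ∈ zsOf l, 0 ≤ b := by
  induction l with
  | nil => simp [zsOf, PySem.List.enumerate]
  | cons x l ih =>
    rw [zsOf_cons]
    intro b hb
    rcases List.mem_append.1 hb with h | h
    · split_ifs at h <;> simp_all
    · obtain ⟨c, hc, rfl⟩ := List.mem_map.1 h
      have := ih c hc; omega

-- appending a zero-free prefix shifts the zero-index list
theorem zsOf_append_nz (u r : List Int) (hu : ∀ y ∈ u, y ≠ 0) :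
    zsOf (u ++ r) = (zsOf r).map (· + (u.length : Int)) := by
  induction u with
  | nil => simp
  | cons x u ih =>
    have hx : x ≠ 0 := hu x (by simp)
    rw [List.cons_append, zsOf_cons, if_neg hx, List.nil_append,
      ih (fun y hy => hu y (by simp [hy])), List.map_map]
    refine List.map_congr_left (fun b _ => ?_)
    simp [Function.comp]
    ring

-- slicing after a dropped prefix: indices shift by the prefix length
theorem slice_shift (s t : List Int) (a b : Int) (ha : -1 ≤ a) (hb : 0 ≤ b) :
    PySem.List.slice (s ++ t) (some (a + (s.length : Int) + 1)) (some (b + (s.length : Int))) =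
      PySem.List.slice t (some (a + 1)) (some b) := by
  rw [PySem.List.slice_toNat (s ++ t) (by omega) (by omega),
    PySem.List.slice_toNat t (by omega) hb]
  have h1 : (a + (s.length : Int) + 1).toNat = s.length + (a + 1).toNat := by omega
  have h2 : (b + (s.length : Int)).toNat - (a + (s.length : Int) + 1).toNat
      = b.toNat - (a + 1).toNat := by omega
  rw [h2, h1, List.drop_append, List.drop_eq_nil_of_le (by omega)]
  simp

theorem chunks_shift (bs : List Int) (s t : List Int) (a : Int)
    (ha : -1 ≤ a) (hbs : ∀ b ∈ bs, 0 ≤ b) :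
    chunks (s ++ t) (a + (s.length : Int)) (bs.map (· + (s.length : Int))) = chunks t a bs := by
  induction bs generalizing a with
  | nil =>
    simp only [List.map_nil, chunks]
    have hlen : ((s ++ t).length : Int) = (t.length : Int) + (s.length : Int) := by
      simp; ring
    rw [hlen]
    have harith : (t.length : Int) + (s.length : Int) - (a + (s.length : Int)) > 1
        ↔ (t.length : Int) - a > 1 := by omega
    have hsl : a + (s.length : Int) + 1 = a + (s.length : Int) + 1 := rfl
    split_ifs with h1 h2 h2
    · rw [show a + (s.length : Int) + 1 = a + (s.length : Int) + 1 from rfl,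
        slice_shift s t a (t.length : Int) ha (by positivity)]
    · exact absurd (harith.1 h1) h2
    · exact absurd (harith.2 h2) h1
    · rfl
  | cons b bs ih =>
    have hb : 0 ≤ b := hbs b (by simp)
    simp only [List.map_cons, chunks]
    rw [show b + (s.length : Int) - (a + (s.length : Int)) = b - a from by ring,
      ih b (by omega) (fun c hc => hbs c (by simp [hc]))]
    split_ifs with h
    · rw [slice_shift s t a b ha hb]
    · rfl

-- peeling a leading depot zero
theorem chunks_peel_zero (v : List Int) :
    chunks (0 :: v) (-1) (zsOf (0 :: v)) = chunks v (-1) (zsOf v) := by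
  rw [zsOf_cons, if_pos rfl, List.singleton_append, chunks]
  have h0 : ¬ ((0 : Int) - (-1) > 1) := by omega
  rw [if_neg h0, List.nil_append]
  have := chunks_shift (zsOf v) [0] v (-1) (by omega) (zsOf_nonneg v)
  simpa using this

theorem dropWhile_head_zero : ∀ (l : List Int) (z : Int) (v : List Int),
    l.dropWhile (· ≠ 0) = z :: v → z = 0 := by
  intro l
  induction l with
  | nil => intro z v h; simp at h
  | cons x t ih =>
    intro z v h
    by_cases hx : x = 0
    · rw [List.dropWhile_cons_of_neg (by simpa using hx)] at h
      rw [← (List.cons.injEq ..).mp h |>.1, hx]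
    · rw [List.dropWhile_cons_of_pos (by simpa using hx)] at h
      exact ih z v h

theorem main_B (tour : List Int) : split_tour_alt tour = splitRec tour := by
  induction tour using splitRec.induct with
  | case1 =>
    have h : splitRec [] = [] := by simp [splitRec]
    rw [h]; decide
  | case2 rest ih =>
    rw [B_eq_chunks, chunks_peel_zero, ← B_eq_chunks, ih, splitRec, if_pos rfl]
  | case3 x rest hx ih =>
    have hunz : ∀ y ∈ x :: rest.takeWhile (· ≠ 0), y ≠ 0 := by
      intro y hy
      rcases List.mem_cons.1 hy with rfl | hy'
      · exact hx
      · simpa using List.mem_takeWhile_imp hy'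
    have htour : x :: rest = (x :: rest.takeWhile (· ≠ 0)) ++ rest.dropWhile (· ≠ 0) := by
      rw [List.cons_append, List.takeWhile_append_dropWhile]
    rw [B_eq_chunks, splitRec, if_neg hx, htour, zsOf_append_nz _ _ hunz]
    have hulen : (0 : Int) < ((x :: rest.takeWhile (· ≠ 0)).length : Int) := by
      simp
    cases hrr : rest.dropWhile (· ≠ 0) with
    | nil =>
      have hz : zsOf ([] : List Int) = [] := rfl
      rw [hz, List.map_nil, chunks]
      rw [if_pos (by norm_num)]
      have hsl : PySem.List.slice ((x :: rest.takeWhile (· ≠ 0)) ++ ([] : List Int))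
          (some (-1 + 1)) (some (((x :: rest.takeWhile (· ≠ 0)) ++ ([] : List Int)).length : Int))
          = (x :: rest.takeWhile (· ≠ 0)) ++ ([] : List Int) := by
        rw [show ((-1 : Int) + 1) = ((0 : Nat) : Int) from by norm_num,
          PySem.List.slice_natCast]
        simp
      rw [hsl]
      simp [splitRec]
    | cons z v =>
      have hz0 : z = 0 := dropWhile_head_zero rest z v hrr
      subst hz0
      rw [zsOf_cons, if_pos rfl, List.singleton_append, List.map_cons, chunks]
      rw [if_pos (by omega)]
      have hsl : PySem.List.slice ((x :: rest.takeWhile (· ≠ 0)) ++ 0 :: v)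
          (some (-1 + 1)) (some ((0 : Int) + ((x :: rest.takeWhile (· ≠ 0)).length : Int)))
          = x :: rest.takeWhile (· ≠ 0) := by
        rw [show ((-1 : Int) + 1) = ((0 : Nat) : Int) from by norm_num,
          show ((0 : Int) + ((x :: rest.takeWhile (· ≠ 0)).length : Int))
            = (((x :: rest.takeWhile (· ≠ 0)).length : Nat) : Int) from by norm_num,
          PySem.List.slice_natCast]
        simp
      rw [hsl]
      have hshift : chunks ((x :: rest.takeWhile (· ≠ 0)) ++ 0 :: v)
          ((0 : Int) + ((x :: rest.takeWhile (· ≠ 0)).length : Int))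
          (((zsOf v).map (· + 1)).map (· + ((x :: rest.takeWhile (· ≠ 0)).length : Int)))
          = chunks v (-1) (zsOf v) := by
        have h1 : ((zsOf v).map (· + 1)).map (· + ((x :: rest.takeWhile (· ≠ 0)).length : Int))
            = (zsOf v).map (· + (((x :: rest.takeWhile (· ≠ 0)) ++ [0]).length : Int)) := by
          rw [List.map_map]
          refine List.map_congr_left (fun b _ => ?_)
          simp [Function.comp]
          ring
        have h2 : (x :: rest.takeWhile (· ≠ 0)) ++ 0 :: v
            = ((x :: rest.takeWhile (· ≠ 0)) ++ [0]) ++ v := by simp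
        have h3 : (0 : Int) + ((x :: rest.takeWhile (· ≠ 0)).length : Int)
            = -1 + (((x :: rest.takeWhile (· ≠ 0)) ++ [0]).length : Int) := by
          simp
        rw [h1, h2, h3]
        exact chunks_shift (zsOf v) _ v (-1) (by omega) (zsOf_nonneg v)
      rw [hshift]
      have hpeel : chunks v (-1) (zsOf v) = split_tour_alt (0 :: v) := by
        rw [B_eq_chunks, chunks_peel_zero]
      rw [hpeel, ← hrr, ih, hrr]
      have hsr : splitRec (0 :: v) = splitRec v := by rw [splitRec, if_pos rfl]
      rw [hsr, List.singleton_append]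

-- ===== VERDICT (by name: the statement is the Claim_ definition above) =====
theorem split_tour_spec : Claim_equal_split_tour := by
  intro tour _
  unfold Spec_split_tour
  rw [split_tour_eq_splitRec, main_B]
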